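-- pv_equiv track=rewrite | github.com/lhwitten/Art-Robot | CV/generate_command.py | group_coord
-- ===== SOURCE A (Python) =====
-- def group_coord(coordinates, threshold=10):
--     """find all the pixels where there is an edge from the binary image, and group them into lines.
--
--     Args:
--         coordinates ([x_list, y_list]): the pixel coordinates where x and y on the binary image in a detected edge
--         threshold (int, optional): the max distance for 2 pixels to be considered in the same group. Defaults to 10.
--
--     Returns:
--         new_groups: A nested list. Each line would be a list.
--     """
--     prev = [coordinates[0][0], coordinates[1][0]]
--     groups = [[prev]]
--     for i in range(1,len(coordinates[0])):
--         x = coordinates[0][i]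
--         y = coordinates[1][i]
--         if abs(x-prev[0]) > 10 or abs(y-prev[1]) > 10:
--             groups.append([])
--         groups[-1].append([x,y])
--         prev = [x,y]
--     new_groups = []
--     for g in groups:
--         x_list = [x for x,_ in g]
--         y_list = [y for _,y in g]
--         new_groups.append([x_list, y_list])
--
--     return new_groups
-- ===== SOURCE B (Python) =====
-- def group_coord(coordinates, threshold=10):
--     """Boundary-index decomposition: one pass records the indices where a new
--     line starts, then the result is built by slicing the x and y lists directly
--     (no per-point [x, y] pairs, no transpose).  Matches the original, including
--     its hardcoded distance 10 (the threshold argument is not consulted there).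
--     """
--     xs = coordinates[0]
--     ys = coordinates[1]
--     n = len(xs)
--     bounds = [0]
--     px, py = xs[0], ys[0]
--     for i in range(1, n):
--         xi, yi = xs[i], ys[i]
--         if abs(xi - px) > 10 or abs(yi - py) > 10:
--             bounds.append(i)
--         px, py = xi, yi
--     bounds.append(n)
--     return [[xs[s:e], ys[s:e]] for s, e in zip(bounds, bounds[1:])]
-- ===== Notes on version B (the rewrite author's own statement) =====
-- stated objective: alternative
-- what changed: Instead of accumulating per-point [x,y] pairs into groups and transposing each group afterwards, B makes one pass that records only the break indices (boundaries), then builds each line directly by slicing the original x and y lists between consecutive boundaries.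
import Mathlib
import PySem

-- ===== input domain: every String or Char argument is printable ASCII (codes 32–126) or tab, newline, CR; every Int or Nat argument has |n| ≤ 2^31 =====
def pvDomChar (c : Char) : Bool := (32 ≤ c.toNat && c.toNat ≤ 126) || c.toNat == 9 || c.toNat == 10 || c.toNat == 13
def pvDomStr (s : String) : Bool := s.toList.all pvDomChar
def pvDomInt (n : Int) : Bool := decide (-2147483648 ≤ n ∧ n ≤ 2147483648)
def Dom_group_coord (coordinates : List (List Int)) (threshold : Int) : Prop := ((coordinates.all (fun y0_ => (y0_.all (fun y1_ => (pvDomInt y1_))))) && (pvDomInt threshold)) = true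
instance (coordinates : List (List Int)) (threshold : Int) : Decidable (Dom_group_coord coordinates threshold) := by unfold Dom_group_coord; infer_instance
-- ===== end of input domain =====

-- B groups consecutive points by recording break indices in one pass and slicing the
-- x/y lists between consecutive boundaries, instead of A's per-point [x,y] pairs
-- grouped and then transposed.  (Both, like the Python, compare against the
-- hardcoded distance 10; the threshold parameter is not consulted, as in A.)

-- ===== PORT A =====
-- loop state: (finished groups, current group = groups[-1], prev); groups = done ++ [cur]
def pvAStep (c0 c1 : List Int) (st : List (List (Int × Int)) × List (Int × Int) × (Int × Int)) (i : Int) :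
    List (List (Int × Int)) × List (Int × Int) × (Int × Int) :=
  let x := PySem.List.pyGetD c0 i 0
  let y := PySem.List.pyGetD c1 i 0
  if |x - st.2.2.1| > 10 || |y - st.2.2.2| > 10 then
    (st.1 ++ [st.2.1], [(x, y)], (x, y))
  else
    (st.1, st.2.1 ++ [(x, y)], (x, y))

def group_coord (coordinates : List (List Int)) (threshold : Int) : List (List (List Int)) :=
  match coordinates with
  | c0 :: c1 :: _ =>
    match c0, c1 with
    | x0 :: _, y0 :: _ =>
      let st := (PySem.List.pyRange 1 (c0.length : Int) 1).foldl (pvAStep c0 c1)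
        ([], [(x0, y0)], (x0, y0))
      (st.1 ++ [st.2.1]).foldl
        (fun acc g => acc ++ [[g.map Prod.fst, g.map Prod.snd]]) []
    | _, _ => []  -- Python raises IndexError (coordinates[0][0] or coordinates[1][0])
  | _ => []       -- Python raises IndexError (coordinates[0] or coordinates[1])

-- ===== PORT B =====
-- loop state: (boundary indices so far, px, py)
def pvBStep (c0 c1 : List Int) (st : List Int × Int × Int) (i : Int) : List Int × Int × Int :=
  let xi := PySem.List.pyGetD c0 i 0
  let yi := PySem.List.pyGetD c1 i 0
  ((if |xi - st.2.1| > 10 || |yi - st.2.2| > 10 then st.1 ++ [i] else st.1), xi, yi)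

def group_coord_alt (coordinates : List (List Int)) (threshold : Int) : List (List (List Int)) :=
  match PySem.List.pyGet? coordinates 0, PySem.List.pyGet? coordinates 1 with
  | some xs, some ys =>
    match PySem.List.pyGet? xs 0, PySem.List.pyGet? ys 0 with
    | some x0, some y0 =>
      let n : Int := xs.length
      let st := (PySem.List.pyRange 1 n 1).foldl (pvBStep xs ys) ([0], x0, y0)
      let bs := st.1 ++ [n]
      (bs.zip bs.tail).map
        (fun se => [PySem.List.slice xs (some se.1) (some se.2),
                    PySem.List.slice ys (some se.1) (some se.2)])
    | _, _ => []  -- Python raises IndexError (empty x or y list)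
  | _, _ => []    -- Python raises IndexError (coordinates[0] or coordinates[1])

-- ===== PRECONDITION & SPEC =====
-- Pre_ excludes exactly the inputs where the Python A raises IndexError:
-- fewer than two coordinate lists, an empty x list, or a y list shorter than the x list.
def Pre_group_coord (coordinates : List (List Int)) (threshold : Int) : Prop :=
  2 ≤ coordinates.length ∧ coordinates.getD 0 [] ≠ [] ∧
    (coordinates.getD 0 []).length ≤ (coordinates.getD 1 []).length
instance (coordinates : List (List Int)) (threshold : Int) : Decidable (Pre_group_coord coordinates threshold) := by unfold Pre_group_coord; infer_instance

def pvWitness_group_coord : List (List Int) × Int := ([[1, 2, 40], [1, 2, 3]], 10)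

def Spec_group_coord (coordinates : List (List Int)) (threshold : Int) (out : List (List (List Int))) : Prop := out = group_coord_alt coordinates threshold
instance (coordinates : List (List Int)) (threshold : Int) (out : List (List (List Int))) : Decidable (Spec_group_coord coordinates threshold out) := by unfold Spec_group_coord; infer_instance

-- ===== CLAIM (what is proved, stated in full; the proofs are below) =====
def Claim_equal_group_coord : Prop := ∀ (coordinates : List (List Int)) (threshold : Int), Dom_group_coord coordinates threshold → Pre_group_coord coordinates threshold → Spec_group_coord coordinates threshold (group_coord coordinates threshold)

-- ===== LEMMAS AND PROOFS =====

-- adjacent pairs of m ++ [y] are those of m plus (last of m, y)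
lemma pv_zipTail_append (m : List Int) (s y : Int) :
    ((m ++ [s]) ++ [y]).zip (((m ++ [s]) ++ [y]).tail)
      = (m ++ [s]).zip ((m ++ [s]).tail) ++ [(s, y)] := by
  induction m with
  | nil => simp
  | cons a t ih =>
    cases t with
    | nil => simp
    | cons b t' => simpa using ih

-- the joint invariant after folding pyRange 1 k
def pvInv (c0 c1 : List Int) (k : Nat)
    (stA : List (List (Int × Int)) × List (Int × Int) × (Int × Int))
    (stB : List Int × Int × Int) : Prop :=
  stA.2.2 = (stB.2.1, stB.2.2) ∧
  ∃ (front : List Int) (s : Nat),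
    stB.1 = front ++ [(s : Int)] ∧ s < k ∧
    stA.2.1.map Prod.fst = (c0.drop s).take (k - s) ∧
    stA.2.1.map Prod.snd = (c1.drop s).take (k - s) ∧
    stA.1.map (fun g => [g.map Prod.fst, g.map Prod.snd])
      = (stB.1.zip stB.1.tail).map
          (fun se => [PySem.List.slice c0 (some se.1) (some se.2),
                      PySem.List.slice c1 (some se.1) (some se.2)])

lemma pv_take_succ_drop (l : List Int) (s k : Nat) (hs : s ≤ k) (hk : k < l.length) :
    (l.drop s).take (k + 1 - s) = (l.drop s).take (k - s) ++ [l[k]] := by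
  have h1 : k + 1 - s = (k - s) + 1 := by omega
  rw [h1, List.take_add_one]
  have h2 : (l.drop s)[k - s]? = some l[k] := by
    rw [List.getElem?_drop]
    have : s + (k - s) = k := by omega
    rw [this, List.getElem?_eq_getElem hk]
  simp [h2]

lemma pv_inv_step (c0 c1 : List Int) (hlen : c0.length ≤ c1.length) (k : Nat)
    (hkn : k < c0.length) (stA stB)
    (h : pvInv c0 c1 k stA stB) :
    pvInv c0 c1 (k + 1) (pvAStep c0 c1 stA (k : Int)) (pvBStep c0 c1 stB (k : Int)) := by
  obtain ⟨hprev, front, s, hb, hsk, hcx, hcy, hdone⟩ := h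
  obtain ⟨done, cur, pv⟩ := stA
  obtain ⟨bounds, px, py⟩ := stB
  simp only at hprev hb hcx hcy hdone
  have hkc1 : k < c1.length := lt_of_lt_of_le hkn hlen
  have hx : PySem.List.pyGetD c0 (k : Int) 0 = c0[k] := by
    rw [PySem.List.pyGetD_natCast]
    simp [List.getD, List.getElem?_eq_getElem hkn]
  have hy : PySem.List.pyGetD c1 (k : Int) 0 = c1[k] := by
    rw [PySem.List.pyGetD_natCast]
    simp [List.getD, List.getElem?_eq_getElem hkc1]
  unfold pvAStep pvBStep
  simp only [hx, hy, hprev]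
  by_cases hbr : |c0[k] - px| > 10 ∨ |c1[k] - py| > 10
  · have hbr' : (|c0[k] - px| > 10 || |c1[k] - py| > 10) = true := by
      simp only [Bool.or_eq_true, decide_eq_true_eq, gt_iff_lt]
      rcases hbr with h | h
      · exact Or.inl h
      · exact Or.inr h
    simp only [hbr', if_true]
    refine ⟨rfl, front ++ [(s : Int)], k, by simp [hb], by omega, ?_, ?_, ?_⟩
    · rw [pv_take_succ_drop c0 k k le_rfl hkn]; simp
    · rw [pv_take_succ_drop c1 k k le_rfl hkc1]; simp
    · simp only [hb, List.map_append, hdone, pv_zipTail_append, List.map_cons, List.map_nil]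
      congr 1
      have e0 : PySem.List.slice c0 (some (s : Int)) (some (k : Int)) = (c0.drop s).take (k - s) :=
        PySem.List.slice_natCast c0 s k
      have e1 : PySem.List.slice c1 (some (s : Int)) (some (k : Int)) = (c1.drop s).take (k - s) :=
        PySem.List.slice_natCast c1 s k
      rw [e0, e1, ← hcx, ← hcy]
  · have hbr' : (|c0[k] - px| > 10 || |c1[k] - py| > 10) = false := by
      simp only [Bool.or_eq_false_iff, decide_eq_false_iff_not, gt_iff_lt, not_lt]
      exact ⟨le_of_not_gt fun h => hbr (Or.inl h), le_of_not_gt fun h => hbr (Or.inr h)⟩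
    simp only [hbr', if_false, Bool.false_eq_true]
    refine ⟨rfl, front, s, hb, by omega, ?_, ?_, hdone⟩
    · rw [List.map_append, hcx, List.map_cons, List.map_nil,
        pv_take_succ_drop c0 s k (by omega) hkn]
    · rw [List.map_append, hcy, List.map_cons, List.map_nil,
        pv_take_succ_drop c1 s k (by omega) hkc1]

lemma pv_inv_all (c0 c1 : List Int) (hlen : c0.length ≤ c1.length) (x0 : Int) (t0 : List Int)
    (hc0 : c0 = x0 :: t0) (y0 : Int) (t1 : List Int) (hc1 : c1 = y0 :: t1)
    (k : Nat) (hk1 : 1 ≤ k) (hkn : k ≤ c0.length) :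
    pvInv c0 c1 k
      ((PySem.List.pyRange 1 (k : Int) 1).foldl (pvAStep c0 c1) ([], [(x0, y0)], (x0, y0)))
      ((PySem.List.pyRange 1 (k : Int) 1).foldl (pvBStep c0 c1) ([0], x0, y0)) := by
  induction k with
  | zero => omega
  | succ k ih =>
    by_cases hk : 1 ≤ k
    · have hrange : PySem.List.pyRange 1 ((k : Int) + 1) 1
          = PySem.List.pyRange 1 (k : Int) 1 ++ [(k : Int)] :=
        PySem.List.pyRange_one_succ_right (by exact_mod_cast hk)
      push_cast
      rw [hrange, List.foldl_append, List.foldl_append]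
      simp only [List.foldl_cons, List.foldl_nil]
      exact pv_inv_step c0 c1 hlen k (by omega)
        _ _ (ih hk (by omega))
    · have hk0 : k = 0 := by omega
      subst hk0
      rw [show (((0 : Nat) + 1 : Nat) : Int) = 1 by norm_num,
        PySem.List.pyRange_one_eq_nil (le_refl 1), List.foldl_nil, List.foldl_nil]
      refine ⟨rfl, [], 0, rfl, by omega, ?_, ?_, by simp⟩
      · simp [hc0]
      · simp [hc1]

-- ===== VERDICT (by name: the statement is the Claim_ definition above) =====
theorem group_coord_spec : Claim_equal_group_coord := by
  intro coordinates threshold _ hpre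
  obtain ⟨h2, hne, hlen⟩ := hpre
  obtain ⟨c0, c1, rest, rfl⟩ : ∃ c0 c1 rest, coordinates = c0 :: c1 :: rest := by
    match coordinates, h2 with
    | c0 :: c1 :: rest, _ => exact ⟨c0, c1, rest, rfl⟩
  simp only [List.getD, List.getElem?_cons_zero, List.getElem?_cons_succ,
    Option.getD_some] at hne hlen
  obtain ⟨x0, t0, rfl⟩ : ∃ x0 t0, c0 = x0 :: t0 := by
    cases c0 with
    | nil => exact absurd rfl hne
    | cons a b => exact ⟨a, b, rfl⟩
  obtain ⟨y0, t1, rfl⟩ : ∃ y0 t1, c1 = y0 :: t1 := by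
    cases c1 with
    | nil => simp at hlen
    | cons a b => exact ⟨a, b, rfl⟩
  unfold Spec_group_coord group_coord group_coord_alt
  have g0 : PySem.List.pyGet? ((x0 :: t0) :: (y0 :: t1) :: rest) (0 : Int) = some (x0 :: t0) := by simp [pysem]
  have g1 : PySem.List.pyGet? ((x0 :: t0) :: (y0 :: t1) :: rest) (1 : Int) = some (y0 :: t1) := by simp [pysem]
  have g2 : PySem.List.pyGet? (x0 :: t0) (0 : Int) = some x0 := by simp [pysem]
  have g3 : PySem.List.pyGet? (y0 :: t1) (0 : Int) = some y0 := by simp [pysem]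
  simp only [g0, g1, g2, g3]
  have hinv := pv_inv_all (x0 :: t0) (y0 :: t1) hlen x0 t0 rfl y0 t1 rfl
      (x0 :: t0).length (by simp) (le_refl _)
  set stA := (PySem.List.pyRange 1 ((x0 :: t0).length : Int) 1).foldl
      (pvAStep (x0 :: t0) (y0 :: t1)) ([], [(x0, y0)], (x0, y0)) with hstA
  set stB := (PySem.List.pyRange 1 ((x0 :: t0).length : Int) 1).foldl
      (pvBStep (x0 :: t0) (y0 :: t1)) ([0], x0, y0) with hstB
  obtain ⟨_, front, s, hb, hsk, hcx, hcy, hdone⟩ := hinv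
  rw [PySem.List.foldl_append_singleton_eq_map]
  simp only [List.nil_append, List.map_append, hdone, hb, pv_zipTail_append,
    List.map_append, List.map_cons, List.map_nil]
  congr 1
  congr 1
  have e0 : PySem.List.slice (x0 :: t0) (some (s : Int)) (some ((x0 :: t0).length : Int))
      = ((x0 :: t0).drop s).take ((x0 :: t0).length - s) :=
    PySem.List.slice_natCast _ s _
  have e1 : PySem.List.slice (y0 :: t1) (some (s : Int)) (some ((x0 :: t0).length : Int))
      = ((y0 :: t1).drop s).take ((x0 :: t0).length - s) :=
    PySem.List.slice_natCast _ s _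
  rw [e0, e1, ← hcx, ← hcy]
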